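-- pv_equiv track=rewrite | github.com/rileyblackwell/Imagi | backend/django/apps/Products/Oasis/Builder/services/create_app_service.py | _inject_into_installed_apps
-- ===== SOURCE A (Python) =====
-- def _inject_into_installed_apps(settings_src: str, module_name: str) -> str:
--     """Insert the module into INSTALLED_APPS list in settings.py.
--     Tries to place it after existing custom apps.
--     """
--     lines = settings_src.splitlines()
--     out = []
--     in_list = False
--     inserted = False
--     for line in lines:
--         out.append(line)
--         if not in_list and line.strip().startswith('INSTALLED_APPS = ['):
--             in_list = True
--             continue
--         if in_list:
--             # Detect end of list
--             if line.strip().startswith(']'):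
--                 if not inserted:
--                     out.insert(len(out) - 1, f"    '{module_name}',")
--                     inserted = True
--                 in_list = False
--     return "\n".join(out)
-- ===== SOURCE B (Python) =====
-- def _inject_into_installed_apps(settings_src: str, module_name: str) -> str:
--     """Insert the module into INSTALLED_APPS list in settings.py.
--     Locate-then-splice: find the first INSTALLED_APPS marker line, then the
--     first closing-bracket line after it, and insert before it."""
--     lines = settings_src.splitlines()
--     i = None
--     for idx, line in enumerate(lines):
--         if line.strip().startswith('INSTALLED_APPS = ['):
--             i = idx
--             break
--     if i is not None:
--         for off, line in enumerate(lines[i + 1:]):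
--             if line.strip().startswith(']'):
--                 lines.insert(i + 1 + off, f"    '{module_name}',")
--                 break
--     return "\n".join(lines)
-- ===== Notes on version B (the rewrite author's own statement) =====
-- stated objective: simpler
-- what changed: Replaced the single-pass accumulator state machine (out list plus in_list/inserted flags) by a locate-then-splice decomposition: find the index of the first INSTALLED_APPS marker line, then the first closing-bracket line after it, and do one list.insert.
import Mathlib
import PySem

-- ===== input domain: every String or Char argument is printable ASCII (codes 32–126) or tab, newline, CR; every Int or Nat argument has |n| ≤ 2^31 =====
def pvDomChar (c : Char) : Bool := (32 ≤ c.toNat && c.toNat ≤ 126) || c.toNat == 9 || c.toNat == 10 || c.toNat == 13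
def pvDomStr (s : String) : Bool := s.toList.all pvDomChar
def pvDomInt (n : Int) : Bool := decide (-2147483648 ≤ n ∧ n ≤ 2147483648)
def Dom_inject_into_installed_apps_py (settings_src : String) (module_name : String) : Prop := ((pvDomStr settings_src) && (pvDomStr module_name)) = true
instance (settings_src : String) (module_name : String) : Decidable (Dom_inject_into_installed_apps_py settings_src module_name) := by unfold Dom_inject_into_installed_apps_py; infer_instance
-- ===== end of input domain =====

-- B replaces A's single-pass accumulator-with-flags state machine by a locate-then-splice
-- two-phase structure (find marker index, find closing index, insert once); same cost, simpler.

-- shared tests, each "line.strip().startswith(...)" as written in both Pythons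
def pvIsMarker (line : String) : Bool :=
  PySem.Str.startswith (PySem.Str.strip line) "INSTALLED_APPS = ["
def pvIsClose (line : String) : Bool :=
  PySem.Str.startswith (PySem.Str.strip line) "]"

-- ===== PORT A =====
-- the loop body of A's 'for line in lines' over the state (out, in_list, inserted)
def pvStepA (module_name : String) (st : List String × Bool × Bool) (line : String) :
    List String × Bool × Bool :=
  let out := st.1 ++ [line]
  let in_list := st.2.1
  let inserted := st.2.2
  if !in_list && pvIsMarker line then
    (out, true, inserted)
  else if in_list then
    if pvIsClose line then
      if !inserted then
        (PySem.List.insert out ((out.length : Int) - 1) ("    '" ++ module_name ++ "',"), false, true)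
      else (out, false, inserted)
    else (out, in_list, inserted)
  else (out, in_list, inserted)

def inject_into_installed_apps_py (settings_src : String) (module_name : String) : String :=
  let lines := PySem.Str.splitlines settings_src
  let st := lines.foldl (pvStepA module_name) ([], false, false)
  PySem.Str.join "\n" st.1

-- ===== PORT B =====
-- first loop of B: index of the first line whose strip() startswith 'INSTALLED_APPS = ['
def pvFindMarker : List String → Nat → Option Nat
  | [], _ => none
  | line :: rest, idx =>
    if pvIsMarker line then some idx else pvFindMarker rest (idx + 1)

-- second loop of B: index (counting from start idx) of the first line whose strip() startswith ']'
def pvFindClose : List String → Nat → Option Nat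
  | [], _ => none
  | line :: rest, idx =>
    if pvIsClose line then some idx else pvFindClose rest (idx + 1)

def inject_into_installed_apps_py_alt (settings_src : String) (module_name : String) : String :=
  let lines := PySem.Str.splitlines settings_src
  let lines' :=
    match pvFindMarker lines 0 with
    | none => lines
    | some i =>
      match pvFindClose (lines.drop (i + 1)) (i + 1) with
      | none => lines
      | some j => PySem.List.insert lines (j : Int) ("    '" ++ module_name ++ "',")
  PySem.Str.join "\n" lines'

-- ===== PRECONDITION & SPEC =====
def Spec_inject_into_installed_apps_py (settings_src : String) (module_name : String) (out : String) : Prop := out = inject_into_installed_apps_py_alt settings_src module_name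
instance (settings_src : String) (module_name : String) (out : String) : Decidable (Spec_inject_into_installed_apps_py settings_src module_name out) := by unfold Spec_inject_into_installed_apps_py; infer_instance

-- ===== CLAIM (what is proved, stated in full; the proofs are below) =====
def Claim_equal_inject_into_installed_apps_py : Prop := ∀ (settings_src : String) (module_name : String), Dom_inject_into_installed_apps_py settings_src module_name → Spec_inject_into_installed_apps_py settings_src module_name (inject_into_installed_apps_py settings_src module_name)

-- ===== LEMMAS AND PROOFS =====

-- reference shapes: insert before the first closing line / copy until the first marker line
def pvClose (ins : String) : List String → List String
  | [] => []
  | l :: ls => if pvIsClose l then ins :: l :: ls else l :: pvClose ins ls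

def pvSeek (ins : String) : List String → List String
  | [] => []
  | l :: ls => if pvIsMarker l then l :: pvClose ins ls else l :: pvSeek ins ls

lemma pvStepA_done (m : String) (ls : List String) :
    ∀ (out : List String) (b : Bool),
      (ls.foldl (pvStepA m) (out, b, true)).1 = out ++ ls := by
  induction ls with
  | nil => intro out b; simp
  | cons l ls ih =>
    intro out b
    rw [List.foldl_cons]
    have hstep : ∃ b', pvStepA m (out, b, true) l = (out ++ [l], b', true) := by
      simp only [pvStepA]
      split_ifs <;> simp_all
    obtain ⟨b', hb'⟩ := hstep
    rw [hb', ih]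
    simp

lemma pvStepA_inlist (m : String) (ls : List String) :
    ∀ (out : List String),
      (ls.foldl (pvStepA m) (out, true, false)).1
        = out ++ pvClose ("    '" ++ m ++ "',") ls := by
  induction ls with
  | nil => intro out; simp [pvClose]
  | cons l ls ih =>
    intro out
    rw [List.foldl_cons]
    by_cases hq : pvIsClose l = true
    · have hstep : pvStepA m (out, true, false) l
          = (PySem.List.insert (out ++ [l]) (((out ++ [l]).length : Int) - 1)
              ("    '" ++ m ++ "',"), false, true) := by
        simp [pvStepA, hq]
      rw [hstep, pvStepA_done]
      simp only [pvClose]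
      rw [if_pos hq]
      have hidx : (((out ++ [l]).length : Int)) - 1 = ((out.length : Nat) : Int) := by
        simp
      rw [hidx, PySem.List.insert_natCast (out ++ [l]) out.length _ (by simp)]
      simp
    · have hstep : pvStepA m (out, true, false) l = (out ++ [l], true, false) := by
        simp [pvStepA, hq]
      rw [hstep, ih]
      simp only [pvClose]
      rw [if_neg hq]
      simp

lemma pvStepA_seek (m : String) (ls : List String) :
    ∀ (out : List String),
      (ls.foldl (pvStepA m) (out, false, false)).1
        = out ++ pvSeek ("    '" ++ m ++ "',") ls := by
  induction ls with
  | nil => intro out; simp [pvSeek]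
  | cons l ls ih =>
    intro out
    rw [List.foldl_cons]
    by_cases hp : pvIsMarker l = true
    · have hstep : pvStepA m (out, false, false) l = (out ++ [l], true, false) := by
        simp [pvStepA, hp]
      rw [hstep, pvStepA_inlist]
      simp only [pvSeek]
      rw [if_pos hp]
      simp
    · have hstep : pvStepA m (out, false, false) l = (out ++ [l], false, false) := by
        simp [pvStepA, hp]
      rw [hstep, ih]
      simp only [pvSeek]
      rw [if_neg hp]
      simp

lemma pvFindMarker_shift (ls : List String) :
    ∀ k, pvFindMarker ls k = (pvFindMarker ls 0).map (· + k) := by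
  induction ls with
  | nil => intro k; simp [pvFindMarker]
  | cons l ls ih =>
    intro k
    simp only [pvFindMarker]
    split_ifs
    · simp
    · rw [ih (k + 1), ih 1]
      cases pvFindMarker ls 0 <;> simp <;> omega

lemma pvFindClose_shift (ls : List String) :
    ∀ k, pvFindClose ls k = (pvFindClose ls 0).map (· + k) := by
  induction ls with
  | nil => intro k; simp [pvFindClose]
  | cons l ls ih =>
    intro k
    simp only [pvFindClose]
    split_ifs
    · simp
    · rw [ih (k + 1), ih 1]
      cases pvFindClose ls 0 <;> simp <;> omega

lemma pvFindClose_none (ins : String) (ls : List String) (h : pvFindClose ls 0 = none) :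
    pvClose ins ls = ls := by
  induction ls with
  | nil => simp [pvClose]
  | cons l ls ih =>
    simp only [pvFindClose] at h
    simp only [pvClose]
    split_ifs at h ⊢ with hq
    · simp only [Nat.zero_add] at h
      rw [pvFindClose_shift ls 1] at h
      cases hc : pvFindClose ls 0 with
      | none => simp [ih hc]
      | some j => rw [hc] at h; simp at h

lemma pvFindClose_bounds (ls : List String) :
    ∀ k j, pvFindClose ls k = some j → k ≤ j ∧ j - k < ls.length := by
  induction ls with
  | nil => intro k j h; simp [pvFindClose] at h
  | cons l ls ih =>
    intro k j h
    simp only [pvFindClose] at h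
    split_ifs at h with hq
    · simp only [Option.some.injEq] at h
      subst h
      simp
    · have := ih (k + 1) j h
      simp only [List.length_cons]
      omega

lemma pvFindClose_some (ins : String) (ls : List String) (j : Nat)
    (h : pvFindClose ls 0 = some j) :
    pvClose ins ls = ls.take j ++ ins :: ls.drop j := by
  induction ls generalizing j with
  | nil => simp [pvFindClose] at h
  | cons l ls ih =>
    simp only [pvFindClose] at h
    simp only [pvClose]
    split_ifs at h ⊢ with hq
    · simp only [Option.some.injEq] at h
      subst h
      simp
    · simp only [Nat.zero_add] at h
      rw [pvFindClose_shift ls 1] at h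
      cases hc : pvFindClose ls 0 with
      | none => rw [hc] at h; simp at h
      | some j0 =>
        rw [hc] at h
        simp only [Option.map_some, Option.some.injEq] at h
        subst h
        simp [ih j0 hc]

lemma pvFindMarker_none (ins : String) (ls : List String) (h : pvFindMarker ls 0 = none) :
    pvSeek ins ls = ls := by
  induction ls with
  | nil => simp [pvSeek]
  | cons l ls ih =>
    simp only [pvFindMarker] at h
    simp only [pvSeek]
    split_ifs at h ⊢ with hp
    · simp only [Nat.zero_add] at h
      rw [pvFindMarker_shift ls 1] at h
      cases hc : pvFindMarker ls 0 with
      | none => simp [ih hc]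
      | some i => rw [hc] at h; simp at h

lemma pvSplice_eq_seek (ins : String) (ls : List String) :
    (match pvFindMarker ls 0 with
     | none => ls
     | some i =>
       match pvFindClose (ls.drop (i + 1)) (i + 1) with
       | none => ls
       | some j => PySem.List.insert ls (j : Int) ins) = pvSeek ins ls := by
  induction ls with
  | nil => simp [pvFindMarker, pvSeek]
  | cons l ls ih =>
    by_cases hp : pvIsMarker l = true
    · simp only [pvFindMarker, hp, if_true, pvSeek]
      simp only [Nat.zero_add, List.drop_succ_cons, List.drop_zero]
      rw [pvFindClose_shift ls 1]
      cases hc : pvFindClose ls 0 with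
      | none => simp [pvFindClose_none ins ls hc]
      | some j0 =>
        have hb := pvFindClose_bounds ls 0 j0 hc
        simp only [Option.map_some]
        rw [show ((j0 + 1 : Nat) : Int) = (((j0 + 1 : Nat) : Nat) : Int) by norm_num]
        rw [PySem.List.insert_natCast (l :: ls) (j0 + 1) ins (by simp; omega)]
        simp [pvFindClose_some ins ls j0 hc]
    · simp only [pvFindMarker, hp, Bool.false_eq_true, if_false, pvSeek]
      rw [pvFindMarker_shift ls 1]
      cases hm : pvFindMarker ls 0 with
      | none =>
        rw [hm] at ih
        simp [pvFindMarker_none ins ls hm]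
      | some i =>
        rw [hm] at ih
        simp only [Option.map_some]
        -- reduce the outer matches (definitional on the 'some' scrutinees)
        have ih' : (match pvFindClose (ls.drop (i + 1)) (i + 1) with
            | none => ls
            | some j => PySem.List.insert ls (j : Int) ins) = pvSeek ins ls := ih
        show (match pvFindClose ((l :: ls).drop (i + 1 + 1)) (i + 1 + 1) with
            | none => l :: ls
            | some j => PySem.List.insert (l :: ls) (j : Int) ins) = l :: pvSeek ins ls
        have hdrop : (l :: ls).drop (i + 1 + 1) = ls.drop (i + 1) := by simp
        rw [hdrop, pvFindClose_shift (ls.drop (i + 1)) (i + 1 + 1)]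
        rw [pvFindClose_shift (ls.drop (i + 1)) (i + 1)] at ih'
        cases hc : pvFindClose (ls.drop (i + 1)) 0 with
        | none =>
          rw [hc] at ih'
          simp only [Option.map_none] at ih' ⊢
          have ih2 : ls = pvSeek ins ls := ih'
          show l :: ls = l :: pvSeek ins ls
          rw [← ih2]
        | some j0 =>
          rw [hc] at ih'
          simp only [Option.map_some] at ih' ⊢
          have hb := pvFindClose_bounds (ls.drop (i + 1)) 0 j0 hc
          have hlen : j0 + (i + 1) ≤ ls.length := by
            simp only [List.length_drop] at hb
            omega
          have ih2 : PySem.List.insert ls ((j0 + (i + 1) : Nat) : Int) ins = pvSeek ins ls := ih'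
          show PySem.List.insert (l :: ls) ((j0 + (i + 1 + 1) : Nat) : Int) ins = l :: pvSeek ins ls
          rw [show ((j0 + (i + 1 + 1) : Nat) : Int) = (((j0 + (i + 1) + 1 : Nat) : Nat) : Int) by push_cast; ring]
          rw [PySem.List.insert_natCast (l :: ls) (j0 + (i + 1) + 1) ins (by simp; omega)]
          rw [PySem.List.insert_natCast ls (j0 + (i + 1)) ins hlen] at ih2
          simp [← ih2]

-- ===== VERDICT (by name: the statement is the Claim_ definition above) =====
theorem inject_into_installed_apps_py_spec : Claim_equal_inject_into_installed_apps_py := by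
  intro settings_src module_name _
  unfold Spec_inject_into_installed_apps_py
  unfold inject_into_installed_apps_py inject_into_installed_apps_py_alt
  dsimp only
  rw [pvStepA_seek module_name (PySem.Str.splitlines settings_src) []]
  rw [← pvSplice_eq_seek ("    '" ++ module_name ++ "',") (PySem.Str.splitlines settings_src)]
  simp
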